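-- pv_equiv track=rewrite | github.com/YooooSW/Algorithm | 프로그래머스/0/181921. 배열 만들기 2/배열 만들기 2.py | solution
-- ===== SOURCE A (Python) =====
-- def solution(l, r):
--     answer = []
--
--     for num in range(l, r + 1):
--         str_num = str(num)
--         if all(c in '05' for c in str_num):
--             answer.append(num)
--     if not answer:
--         return [-1]
--
--     return answer
-- ===== SOURCE B (Python) =====
-- def _bd(m):
--     # decimal number whose digits are the binary digits of m (e.g. 6 = 0b110 -> 110)
--     return 0 if m == 0 else _bd(m // 2) * 10 + m % 2
--
--
-- def solution(l, r):
--     # generate the numbers made of digits 0/5 directly (5 * binary-pattern), in increasing order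
--     answer = [0] if l <= 0 <= r else []
--     k = 1
--     while 5 * _bd(k) <= r:
--         v = 5 * _bd(k)
--         if v >= l:
--             answer.append(v)
--         k += 1
--     return answer if answer else [-1]
-- ===== Notes on version B (the rewrite author's own statement) =====
-- stated objective: faster
-- what changed: Instead of scanning every integer in [l, r] and string-testing its digits, B directly generates the numbers whose digits are all 0 or 5 (they are exactly 5 times the numbers read off from binary counters) in increasing order and keeps those in [l, r].
import Mathlib
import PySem

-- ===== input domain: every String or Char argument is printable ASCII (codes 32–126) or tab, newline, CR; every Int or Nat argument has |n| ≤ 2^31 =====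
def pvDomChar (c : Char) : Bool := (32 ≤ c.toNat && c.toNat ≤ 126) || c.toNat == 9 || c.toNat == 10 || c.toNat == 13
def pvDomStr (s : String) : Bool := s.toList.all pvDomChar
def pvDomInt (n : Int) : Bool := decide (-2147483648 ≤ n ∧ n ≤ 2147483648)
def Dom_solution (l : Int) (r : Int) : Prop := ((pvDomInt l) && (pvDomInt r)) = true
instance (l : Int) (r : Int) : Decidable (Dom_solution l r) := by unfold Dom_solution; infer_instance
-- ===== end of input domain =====

-- B replaces A's scan of every integer in [l, r] by direct generation of the numbers whose
-- decimal digits are all 0 or 5 (they are 5 times the numbers with digits 0/1, enumerated in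
-- increasing order via binary counting); objective: faster.

-- ===== PORT A =====
def solution (l : Int) (r : Int) : List Int :=
  let answer : List Int := []
  let answer := (PySem.List.pyRange l (r + 1) 1).foldl
    (fun answer num =>
      let str_num := (PySem.Int.toStr num).toList
      -- `c in '05'` : the string '05' as its character list
      if str_num.all (fun c => PySem.Chars.isIn [c] ['0', '5']) then answer ++ [num] else answer)
    answer
  if answer = [] then [-1] else answer

-- ===== PORT B =====
-- _bd: decimal number whose digits are the binary digits of m
def bd (m : Nat) : Nat :=
  if _h : m = 0 then 0 else bd (m / 2) * 10 + m % 2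
termination_by m
decreasing_by exact Nat.div_lt_self (Nat.pos_of_ne_zero _h) (by norm_num)

-- the `while 5 * _bd(k) <= r` loop; the fuel argument only makes it total (the loop always
-- breaks before `r.toNat + 1` iterations since bd k ≥ k)
def bdLoop (l : Int) (r : Int) : Nat → Nat → List Int → List Int
  | 0, _, answer => answer
  | fuel + 1, k, answer =>
    let v : Int := 5 * (bd k : Int)
    if v ≤ r then
      bdLoop l r fuel (k + 1) (if l ≤ v then answer ++ [v] else answer)
    else answer

def solution_alt (l : Int) (r : Int) : List Int :=
  let answer : List Int := if l ≤ 0 ∧ 0 ≤ r then [0] else []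
  let answer := bdLoop l r (r.toNat + 1) 1 answer
  if answer = [] then [-1] else answer

-- ===== PRECONDITION & SPEC =====
def Spec_solution (l : Int) (r : Int) (out : List Int) : Prop := out = solution_alt l r
instance (l : Int) (r : Int) (out : List Int) : Decidable (Spec_solution l r out) := by unfold Spec_solution; infer_instance

-- ===== CLAIM (what is proved, stated in full; the proofs are below) =====
def Claim_equal_solution : Prop := ∀ (l : Int) (r : Int), Dom_solution l r → Spec_solution l r (solution l r)

-- ===== LEMMAS AND PROOFS =====

-- A's per-number test, as a named predicate
def pb (num : Int) : Bool :=
  (PySem.Int.toStr num).toList.all (fun c => PySem.Chars.isIn [c] ['0', '5'])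

-- the digit list Nat.toDigits 10 produces, by structural /10 recursion
def digs (n : Nat) : List Char :=
  if _h : n / 10 = 0 then [Nat.digitChar (n % 10)]
  else digs (n / 10) ++ [Nat.digitChar (n % 10)]
termination_by n
decreasing_by exact Nat.div_lt_self (by omega) (by norm_num)

-- "all decimal digits of n are 0 or 5", arithmetically
def good (n : Nat) : Bool :=
  if _h : n / 10 = 0 then (n % 10 == 0 || n % 10 == 5)
  else good (n / 10) && (n % 10 == 0 || n % 10 == 5)
termination_by n
decreasing_by exact Nat.div_lt_self (by omega) (by norm_num)

lemma tdc (fuel : Nat) : ∀ (n : Nat) (acc : List Char), n ≤ fuel →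
    Nat.toDigitsCore 10 (fuel + 1) n acc = digs n ++ acc := by
  induction fuel with
  | zero =>
    intro n acc hn
    interval_cases n
    rw [digs]; rfl
  | succ fuel ih =>
    intro n acc hn
    rw [show Nat.toDigitsCore 10 (fuel + 1 + 1) n acc =
        (if n / 10 = 0 then Nat.digitChar (n % 10) :: acc
         else Nat.toDigitsCore 10 (fuel + 1) (n / 10) (Nat.digitChar (n % 10) :: acc)) from rfl]
    by_cases h : n / 10 = 0
    · rw [if_pos h]
      conv_rhs => rw [digs]
      rw [dif_pos h]
      rfl
    · rw [if_neg h, ih (n / 10) _ (by omega)]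
      conv_rhs => rw [digs]
      rw [dif_neg h]
      simp only [List.append_assoc, List.cons_append, List.nil_append]

lemma toDigits_eq_digs (n : Nat) : Nat.toDigits 10 n = digs n := by
  have := tdc n n [] le_rfl
  simpa [Nat.toDigits] using this

lemma digitChar_05 (d : Nat) (hd : d < 10) :
    PySem.Chars.isIn [Nat.digitChar d] ['0', '5'] = (d == 0 || d == 5) := by
  interval_cases d <;> decide

lemma all_digs (n : Nat) :
    (digs n).all (fun c => PySem.Chars.isIn [c] ['0', '5']) = good n := by
  induction n using digs.induct with
  | case1 n h =>
    rw [digs, good]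
    simp [h, digitChar_05 (n % 10) (by omega)]
  | case2 n h ih =>
    rw [digs, good]
    simp [h, ih, digitChar_05 (n % 10) (by omega)]

lemma good_shift (n : Nat) :
    good n = ((n % 10 == 0 || n % 10 == 5) && good (n / 10)) := by
  by_cases h : n / 10 = 0
  · rw [good, h]; simp
    rw [show good 0 = true from by rw [good]; rfl]
    simp
  · rw [good]; simp [h, Bool.and_comm]

lemma pb_iff (x : Int) : pb x = true ↔ 0 ≤ x ∧ good x.toNat = true := by
  unfold pb
  rw [PySem.Int.toList_toStr, PySem.Int.toChars]
  by_cases hx : x < 0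
  · simp only [if_pos hx, List.all_cons]
    rw [show PySem.Chars.isIn ['-'] ['0', '5'] = false from by decide]
    simp; omega
  · simp only [if_neg hx, toDigits_eq_digs, all_digs]
    simp; omega

lemma bd_zero : bd 0 = 0 := by unfold bd; rfl

lemma bd_eq (m : Nat) (h : m ≠ 0) : bd m = bd (m / 2) * 10 + m % 2 := by
  rw [bd]; simp [h]

lemma bd_ge (m : Nat) : m ≤ bd m := by
  induction m using Nat.strong_induction_on with
  | _ m ih =>
    by_cases h : m = 0
    · simp [h, bd_zero]
    · rw [bd_eq m h]
      have := ih (m / 2) (by omega)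
      omega

lemma bd_lt_succ (k : Nat) : bd k < bd (k + 1) := by
  induction k using Nat.strong_induction_on with
  | _ k ih =>
    by_cases h0 : k = 0
    · subst h0; rw [show bd 1 = bd 0 * 10 + 1 from bd_eq 1 (by omega)]; simp [bd_zero]
    · rcases Nat.even_or_odd k with ⟨a, ha⟩ | ⟨a, ha⟩
      · -- k = 2a, a ≥ 1
        rw [bd_eq k h0, bd_eq (k + 1) (by omega)]
        have h1 : (k + 1) / 2 = k / 2 := by omega
        rw [h1]; omega
      · -- k = 2a+1
        rw [bd_eq k h0, bd_eq (k + 1) (by omega)]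
        have h1 : (k + 1) / 2 = k / 2 + 1 := by omega
        have h2 : bd (k / 2) < bd (k / 2 + 1) := ih (k / 2) (by omega)
        rw [h1]; omega

lemma bd_mono : StrictMono bd := strictMono_nat_of_lt_succ bd_lt_succ

lemma good_of_bd (j : Nat) : good (5 * bd j) = true := by
  induction j using Nat.strong_induction_on with
  | _ j ih =>
    by_cases h0 : j = 0
    · subst h0; rw [bd_zero, good]; rfl
    · rw [bd_eq j h0]
      have hrec : good (5 * bd (j / 2)) = true := ih (j / 2) (by omega)
      rw [good_shift]
      have hm : (5 * (bd (j / 2) * 10 + j % 2)) % 10 = 5 * (j % 2) := by omega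
      have hd : (5 * (bd (j / 2) * 10 + j % 2)) / 10 = 5 * bd (j / 2) := by omega
      rw [hm, hd, hrec]
      have : j % 2 = 0 ∨ j % 2 = 1 := by omega
      rcases this with h | h <;> simp [h]

lemma good_iff_exists (n : Nat) : good n = true ↔ ∃ j : Nat, n = 5 * bd j := by
  constructor
  · induction n using Nat.strong_induction_on with
    | _ n ih =>
      intro hg
      by_cases h0 : n = 0
      · exact ⟨0, by simp [h0, bd_zero]⟩
      · rw [good_shift] at hg
        simp only [Bool.and_eq_true] at hg
        obtain ⟨a, ha⟩ := ih (n / 10) (by omega) hg.2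
        have hd : n % 10 = 0 ∨ n % 10 = 5 := by
          rcases hg with ⟨h1, -⟩; simp at h1; omega
        rcases hd with h5 | h5
        · refine ⟨2 * a, ?_⟩
          by_cases haz : a = 0
          · exfalso
            apply h0
            have hz : n / 10 = 0 := by rw [ha, haz, bd_zero]
            omega
          · rw [bd_eq (2 * a) (by omega)]
            have h2 : (2 * a) / 2 = a := by omega
            have h3 : (2 * a) % 2 = 0 := by omega
            rw [h2, h3]
            omega
        · refine ⟨2 * a + 1, ?_⟩
          rw [bd_eq (2 * a + 1) (by omega)]
          have h2 : (2 * a + 1) / 2 = a := by omega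
          have h3 : (2 * a + 1) % 2 = 1 := by omega
          rw [h2, h3]
          omega
  · rintro ⟨j, rfl⟩; exact good_of_bd j

lemma bdLoop_eq (l r : Int) : ∀ (fuel k : Nat) (acc : List Int),
    bdLoop l r fuel k acc =
      acc ++ ((List.range fuel).map (fun i => (5 * (bd (k + i) : Int)))).filter
        (fun v => decide (l ≤ v) && decide (v ≤ r)) := by
  intro fuel
  induction fuel with
  | zero => intro k acc; simp [bdLoop]
  | succ fuel ih =>
    intro k acc
    rw [bdLoop]
    by_cases hv : (5 : Int) * (bd k : Int) ≤ r
    · rw [if_pos hv, ih]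
      rw [List.range_succ_eq_map, List.map_cons, List.map_map, List.filter_cons]
      have hmap : (List.map ((fun i => (5 * (bd (k + i) : Int))) ∘ (fun i => i + 1)) (List.range fuel))
          = List.map (fun i => (5 * (bd (k + 1 + i) : Int))) (List.range fuel) := by
        apply List.map_congr_left
        intro i _
        have h1 : k + (i + 1) = k + 1 + i := by omega
        simp only [Function.comp_apply, h1]
      rw [hmap]
      simp only [Nat.add_zero]
      by_cases hl : l ≤ (5 : Int) * (bd k : Int)
      · simp [hl, hv]
      · simp [hl, hv]
    · rw [if_neg hv]
      have : (((List.range (fuel + 1)).map (fun i => (5 * (bd (k + i) : Int)))).filter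
          (fun v => decide (l ≤ v) && decide (v ≤ r))) = [] := by
        rw [List.filter_eq_nil_iff]
        intro v hv'
        simp only [List.mem_map, List.mem_range] at hv'
        obtain ⟨i, -, rfl⟩ := hv'
        have hmono : bd k ≤ bd (k + i) := bd_mono.monotone (by omega)
        have hgt : ¬ ((5 : Int) * (bd (k + i) : Int) ≤ r) := by
          intro hc
          apply hv
          have : (bd k : Int) ≤ (bd (k + i) : Int) := by exact_mod_cast hmono
          omega
        simp [hgt]
      rw [this, List.append_nil]

-- the two pre-emptiness-check lists coincide
lemma main_eq (l r : Int) :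
    (PySem.List.pyRange l (r + 1) 1).filter pb =
      (if l ≤ 0 ∧ 0 ≤ r then [0] else []) ++
        ((List.range (r.toNat + 1)).map (fun i => (5 * (bd (1 + i) : Int)))).filter
          (fun v => decide (l ≤ v) && decide (v ≤ r)) := by
  set acc0 : List Int := if l ≤ 0 ∧ 0 ≤ r then [0] else [] with hacc0
  set fl : List Int := ((List.range (r.toNat + 1)).map (fun i => (5 * (bd (1 + i) : Int)))).filter
      (fun v => decide (l ≤ v) && decide (v ≤ r)) with hfl
  have hpwL : ((PySem.List.pyRange l (r + 1) 1).filter pb).Pairwise (· < ·) :=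
    (PySem.List.pairwise_lt_pyRange_one l (r + 1)).filter pb
  have hpw_fl : fl.Pairwise (· < ·) := by
    refine List.Pairwise.sublist List.filter_sublist ?_
    refine List.Pairwise.map (S := fun (a b : Int) => a < b) _ ?_ List.pairwise_lt_range
    intro a b hab
    have h : bd (1 + a) < bd (1 + b) := bd_mono (by omega)
    have h' : ((bd (1 + a) : Nat) : Int) < ((bd (1 + b) : Nat) : Int) := by exact_mod_cast h
    omega
  have h_fl_pos : ∀ y ∈ fl, (0 : Int) < y := by
    intro y hy
    rw [hfl] at hy
    obtain ⟨hy', -⟩ := List.mem_filter.1 hy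
    obtain ⟨i, -, rfl⟩ := List.mem_map.1 hy'
    have h1 : 1 + i ≤ bd (1 + i) := bd_ge (1 + i)
    have h2 : (1 : Int) ≤ (bd (1 + i) : Int) := by exact_mod_cast Nat.le_trans (by omega) h1
    omega
  have hpwR : (acc0 ++ fl).Pairwise (· < ·) := by
    rw [List.pairwise_append]
    refine ⟨?_, hpw_fl, ?_⟩
    · rw [hacc0]; split <;> simp
    · intro a ha y hy
      have ha0 : a = 0 := by
        rw [hacc0] at ha; revert ha; split <;> simp
      rw [ha0]; exact h_fl_pos y hy
  have hmem : ∀ x : Int,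
      x ∈ (PySem.List.pyRange l (r + 1) 1).filter pb ↔ x ∈ acc0 ++ fl := by
    intro x
    simp only [List.mem_filter, PySem.List.mem_pyRange_one, List.mem_append, hfl, hacc0,
      List.mem_map, List.mem_range, pb_iff, good_iff_exists, Bool.and_eq_true, decide_eq_true_eq]
    constructor
    · rintro ⟨⟨hlx, hxr⟩, hx0, j, hj⟩
      have hxj : x = (5 * (bd j : Nat) : Int) := by omega
      by_cases hj0 : j = 0
      · left
        rw [hj0, bd_zero] at hxj
        rw [if_pos ⟨by omega, by omega⟩]
        simp only [List.mem_singleton]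
        omega
      · right
        have hbj : ((j : Nat) : Int) ≤ ((bd j : Nat) : Int) := by exact_mod_cast bd_ge j
        refine ⟨⟨j - 1, by omega, ?_⟩, hlx, by omega⟩
        rw [show 1 + (j - 1) = j from by omega]
        omega
    · rintro (hacc | ⟨⟨i, hi, rfl⟩, hlx, hxr⟩)
      · by_cases hc : l ≤ 0 ∧ 0 ≤ r
        · rw [if_pos hc] at hacc
          simp only [List.mem_singleton] at hacc
          subst hacc
          exact ⟨⟨hc.1, by omega⟩, le_refl 0, 0, by simp [bd_zero]⟩
        · rw [if_neg hc] at hacc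
          simp at hacc
      · have h0y : (0 : Int) ≤ 5 * ((bd (1 + i) : Nat) : Int) := by positivity
        exact ⟨⟨hlx, by omega⟩, h0y, 1 + i, by omega⟩
  exact List.Perm.eq_of_pairwise
    (fun a b _ _ h1 h2 => absurd h1 (not_lt.2 h2.le))
    hpwL hpwR
    ((List.perm_ext_iff_of_nodup
      (hpwL.imp (fun h => ne_of_lt h))
      (hpwR.imp (fun h => ne_of_lt h))).2 hmem)

-- ===== VERDICT (by name: the statement is the Claim_ definition above) =====
theorem solution_spec : Claim_equal_solution := by
  intro l r _
  simp only [Spec_solution, solution, solution_alt]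
  rw [show (fun (answer : List Int) (num : Int) =>
        let str_num := (PySem.Int.toStr num).toList
        if str_num.all (fun c => PySem.Chars.isIn [c] ['0', '5']) then answer ++ [num] else answer)
      = (fun answer num => if pb num then answer ++ [(fun x => x) num] else answer) from rfl,
    PySem.List.foldl_append_if, bdLoop_eq, List.map_id', main_eq]
  simp
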